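-- pv_equiv track=rewrite | github.com/plat16022005/test-github | Bai06/Xử lí chuỗi/Bai15.py | tim_chuoi_con
-- ===== SOURCE A (Python) =====
-- def tim_chuoi_con(a, b):
--     s = ""
--     l = []
--     for i in range(len(a)):
--         for j in a[i:]:
--             s += j
--             if (len(s)>=b):
--                 l.append(s)
--         s = ""
--     return l
-- ===== SOURCE B (Python) =====
-- def tim_chuoi_con(a, b):
--     n = len(a)
--     start = max(b, 1)
--     return [a[i:end] for i in range(n) for end in range(i + start, n + 1)]
-- ===== Notes on version B (the rewrite author's own statement) =====
-- stated objective: simpler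
-- what changed: Replaces the char-by-char string accumulation with a length guard by a single comprehension that slices a[i:end] directly for end in range(i+max(b,1), n+1), removing the accumulator and the branch.
import Mathlib
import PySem

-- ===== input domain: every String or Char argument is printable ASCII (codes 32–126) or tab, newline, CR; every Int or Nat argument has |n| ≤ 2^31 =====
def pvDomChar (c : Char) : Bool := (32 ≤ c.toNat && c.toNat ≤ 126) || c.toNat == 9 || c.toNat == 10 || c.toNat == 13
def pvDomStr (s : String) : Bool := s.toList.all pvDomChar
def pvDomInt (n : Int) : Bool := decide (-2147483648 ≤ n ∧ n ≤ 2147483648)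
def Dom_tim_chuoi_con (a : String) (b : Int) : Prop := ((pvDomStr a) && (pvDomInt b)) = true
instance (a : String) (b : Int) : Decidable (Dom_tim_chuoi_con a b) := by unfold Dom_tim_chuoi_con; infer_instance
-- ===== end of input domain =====

-- B replaces A's char-by-char accumulator with direct slicing over computed bounds (objective: simpler).

-- ===== PORT A =====
-- for i in range(len(a)): for j in a[i:]: s += j; if len(s) >= b: l.append(s); s = ""
def tim_chuoi_con (a : String) (b : Int) : List String :=
  let cs := a.toList
  ((PySem.List.pyRange 0 (cs.length : Int) 1).foldl
    (fun (l : List String) (i : Int) =>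
      ((PySem.List.slice cs (some i) none).foldl
        (fun (p : List Char × List String) (j : Char) =>
          let s := p.1 ++ [j]
          (s, if b ≤ (s.length : Int) then p.2 ++ [String.ofList s] else p.2))
        (([] : List Char), l)).2)
    [])

-- ===== PORT B =====
-- return [a[i:end] for i in range(n) for end in range(i + start, n + 1)] with start = max(b, 1)
def tim_chuoi_con_alt (a : String) (b : Int) : List String :=
  let cs := a.toList
  let n : Int := cs.length
  let start : Int := max b 1
  (PySem.List.pyRange 0 n 1).flatMap
    (fun i => (PySem.List.pyRange (i + start) (n + 1) 1).map
      (fun e => String.ofList (PySem.List.slice cs (some i) (some e))))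

-- ===== PRECONDITION & SPEC =====
def Spec_tim_chuoi_con (a : String) (b : Int) (out : List String) : Prop := out = tim_chuoi_con_alt a b
instance (a : String) (b : Int) (out : List String) : Decidable (Spec_tim_chuoi_con a b out) := by unfold Spec_tim_chuoi_con; infer_instance

-- ===== CLAIM (what is proved, stated in full; the proofs are below) =====
def Claim_equal_tim_chuoi_con : Prop := ∀ (a : String) (b : Int), Dom_tim_chuoi_con a b → Spec_tim_chuoi_con a b (tim_chuoi_con a b)

-- ===== LEMMAS AND PROOFS =====

-- A's inner loop, characterised: appending chars of t to a prefix `pre`, collecting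
-- each extended prefix whose length is ≥ b.
theorem innerA_char (b : Int) (t : List Char) : ∀ (pre : List Char) (acc : List String),
    (t.foldl
      (fun (p : List Char × List String) (j : Char) =>
        let s := p.1 ++ [j]
        (s, if b ≤ (s.length : Int) then p.2 ++ [String.ofList s] else p.2))
      (pre, acc)).2
    = acc ++ (List.range t.length).filterMap
        (fun k => if b ≤ ((pre.length + k + 1 : Nat) : Int)
                  then some (String.ofList (pre ++ t.take (k + 1))) else none) := by
  induction t with
  | nil => intro pre acc; simp
  | cons j t ih =>
    intro pre acc
    rw [List.foldl_cons]
    by_cases h : b ≤ ((pre.length : Int) + 1) <;>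
    · simp only [List.length_cons, List.range_succ_eq_map, List.filterMap_cons,
        List.filterMap_map, List.take_succ_cons, List.take_zero]
      rw [ih]
      simp [h]
      apply List.filterMap_congr
      intro k _
      rw [show (pre.length : Int) + 1 + (k : Int) + 1 = (pre.length : Int) + ((k : Int) + 1) + 1 by ring]

-- The guard `len ≥ b` over prefixes of every length 1..n is the range of lengths max(b,1)..n.
theorem filter_range_eq (b : Int) (g : Nat → String) : ∀ (n : Nat),
    (List.range n).filterMap
      (fun k => if b ≤ ((0 + k + 1 : Nat) : Int) then some (g (k + 1)) else none)
    = (List.range (n + 1 - (max b 1).toNat)).map (fun k => g ((max b 1).toNat + k)) := by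
  have h1 : (1 : Int) ≤ max b 1 := le_max_right b 1
  intro n
  induction n with
  | zero =>
    have hz : 0 + 1 - (max b 1).toNat = 0 := by omega
    simp [hz]
  | succ n ih =>
    rw [List.range_succ, List.filterMap_append, ih]
    by_cases h : b ≤ (n : Int) + 1
    · have hm : ((max b 1).toNat : Int) = max b 1 := Int.toNat_of_nonneg (by omega)
      have h2 : max b 1 ≤ (n : Int) + 1 := max_le h (by omega)
      have hthis : n + 1 + 1 - (max b 1).toNat = (n + 1 - (max b 1).toNat) + 1 := by omega
      have harg : (max b 1).toNat + (n + 1 - (max b 1).toNat) = n + 1 := by omega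
      rw [hthis, List.range_succ, List.map_append]
      simp [h, harg]
    · have hthis : n + 1 + 1 - (max b 1).toNat = n + 1 - (max b 1).toNat := by omega
      rw [hthis]
      simp [h]

theorem flatMap_congr_mem {α β : Type} (l : List α) (f g : α → List β)
    (h : ∀ x ∈ l, f x = g x) : l.flatMap f = l.flatMap g := by
  induction l with
  | nil => rfl
  | cons x l ih =>
    simp only [List.flatMap_cons]
    rw [h x (List.mem_cons_self), ih (fun y hy => h y (List.mem_cons_of_mem _ hy))]

-- ===== VERDICT (by name: the statement is the Claim_ definition above) =====
theorem tim_chuoi_con_spec : Claim_equal_tim_chuoi_con := by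
  intro a b _
  unfold Spec_tim_chuoi_con tim_chuoi_con tim_chuoi_con_alt
  set cs := a.toList with hcs
  simp only []
  have hcongr := PySem.List.foldl_congr_mem
    (l := PySem.List.pyRange 0 (cs.length : Int) 1)
    (init := ([] : List String))
    (f := fun (l : List String) (i : Int) =>
      ((PySem.List.slice cs (some i) none).foldl
        (fun (p : List Char × List String) (j : Char) =>
          let s := p.1 ++ [j]
          (s, if b ≤ (s.length : Int) then p.2 ++ [String.ofList s] else p.2))
        (([] : List Char), l)).2)
    (g := fun (l : List String) (i : Int) =>
      l ++ (List.range (PySem.List.slice cs (some i) none).length).filterMap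
        (fun k => if b ≤ ((0 + k + 1 : Nat) : Int)
                  then some (String.ofList (([] : List Char) ++ (PySem.List.slice cs (some i) none).take (k + 1))) else none))
    (by intro acc i _; exact innerA_char b _ [] acc)
  rw [hcongr, PySem.List.foldl_append_eq_flatMap]
  simp only [List.nil_append]
  apply flatMap_congr_mem
  intro i hi
  rw [PySem.List.mem_pyRange_one] at hi
  obtain ⟨hi0, hin⟩ := hi
  obtain ⟨inat, rfl⟩ : ∃ m : Nat, i = (m : Int) := ⟨i.toNat, by omega⟩
  rw [PySem.List.slice_from_natCast]
  rw [filter_range_eq b (fun L => String.ofList ((cs.drop inat).take L))]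
  have h1 : (1 : Int) ≤ max b 1 := le_max_right b 1
  have hm : ((max b 1).toNat : Int) = max b 1 := Int.toNat_of_nonneg (by omega)
  rw [PySem.List.pyRange_one]
  have hlen : (((cs.length : Int) + 1 - ((inat : Int) + max b 1)).toNat)
      = (cs.drop inat).length + 1 - (max b 1).toNat := by
    simp only [List.length_drop]
    omega
  rw [hlen, List.map_map]
  apply List.map_congr_left
  intro k _
  simp only [Function.comp_apply]
  have he : (inat : Int) + max b 1 + (k : Int) = (inat : Int) + (((max b 1).toNat + k : Nat) : Int) := by
    push_cast; omega
  rw [he, PySem.List.slice_natCast_add]
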